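-- pv_equiv track=rewrite | github.com/binnev/omni-challenge | functions.py | combine_subroutes
-- ===== SOURCE A (Python) =====
-- def combine_subroutes(subroutes):
--     # trivial case -- nothing to rearrange
--     if len(subroutes) < 2:
--         return subroutes
--
--     combined = []
--
--     # base case -- combine two subroutes
--     if len(subroutes) == 2:
--         for r1 in (subroutes[0], list(reversed(subroutes[0]))):
--             for r2 in (subroutes[-1], list(reversed(subroutes[-1]))):
--                 combined.append(r1 + r2)
--
--     # recursive case -- more than 2 subroutes
--     elif len(subroutes) > 1:
--         # consider the first subroute and its reverse
--         for r1 in (subroutes[0], list(reversed(subroutes[0]))):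
--             # compared to all the recombinations of the other subroutes
--             for subroute in combine_subroutes(subroutes[1:]):
--                 # ...and their reverses
--                 for sub in (subroute, list(reversed(subroute))):
--                     combined.append(r1 + sub)
--
--     return combined
-- ===== SOURCE B (Python) =====
-- def combine_subroutes(subroutes):
--     # bottom-up: fold the heads into the accumulated tail combinations
--     if len(subroutes) < 2:
--         return subroutes
--     current = [subroutes[-1]]
--     for head in reversed(subroutes[:-1]):
--         current = [r1 + d
--                    for r1 in (head, list(reversed(head)))
--                    for sub in current
--                    for d in (sub, list(reversed(sub)))]
--     return current
-- ===== Notes on version B (the rewrite author's own statement) =====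
-- stated objective: alternative
-- what changed: Replaced A's linear recursion on subroutes[1:] with a single bottom-up loop that folds each head (and its reverse) into an accumulated list of tail combinations, preserving the exact nesting order.
import Mathlib
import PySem

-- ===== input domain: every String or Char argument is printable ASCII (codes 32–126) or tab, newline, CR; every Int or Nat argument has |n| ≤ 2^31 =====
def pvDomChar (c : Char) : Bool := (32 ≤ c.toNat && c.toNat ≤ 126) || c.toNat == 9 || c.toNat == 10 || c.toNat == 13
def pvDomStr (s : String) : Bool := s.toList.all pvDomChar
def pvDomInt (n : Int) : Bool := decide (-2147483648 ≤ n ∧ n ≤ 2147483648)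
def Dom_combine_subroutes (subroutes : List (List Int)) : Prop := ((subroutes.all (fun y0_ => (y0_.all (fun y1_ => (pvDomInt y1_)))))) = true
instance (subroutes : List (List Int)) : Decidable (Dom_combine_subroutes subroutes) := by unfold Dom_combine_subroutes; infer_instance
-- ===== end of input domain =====

-- B replaces A's linear recursion on the tail by a single bottom-up fold that threads the
-- accumulated tail combinations; same values, same order (objective: alternative decomposition).

-- ===== PORT A =====
-- A's recursion on subroutes[1:]; subroutes[0] / subroutes[-1] are rendered as headD / getLastD,
-- exact here because both branches guard len(subroutes) ≥ 2.
def combine_subroutes (subroutes : List (List Int)) : List (List Int) :=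
  if subroutes.length < 2 then subroutes
  else if subroutes.length = 2 then
    [subroutes.headD [], (subroutes.headD []).reverse].flatMap (fun r1 =>
      [subroutes.getLastD [], (subroutes.getLastD []).reverse].map (fun r2 => r1 ++ r2))
  else
    [subroutes.headD [], (subroutes.headD []).reverse].flatMap (fun r1 =>
      (combine_subroutes subroutes.tail).flatMap (fun sub =>
        [r1 ++ sub, r1 ++ sub.reverse]))
termination_by subroutes.length
decreasing_by simp [List.length_tail]; omega

-- ===== PORT B =====
-- one step of B's loop body: the triple comprehension over (head, current)
def pvStep (head : List Int) (current : List (List Int)) : List (List Int) :=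
  [head, head.reverse].flatMap (fun r1 =>
    current.flatMap (fun sub => [r1 ++ sub, r1 ++ sub.reverse]))

def combine_subroutes_alt (subroutes : List (List Int)) : List (List Int) :=
  if subroutes.length < 2 then subroutes
  else subroutes.dropLast.foldr pvStep [subroutes.getLastD []]

-- ===== PRECONDITION & SPEC =====
def Spec_combine_subroutes (subroutes : List (List Int)) (out : List (List Int)) : Prop := out = combine_subroutes_alt subroutes
instance (subroutes : List (List Int)) (out : List (List Int)) : Decidable (Spec_combine_subroutes subroutes out) := by unfold Spec_combine_subroutes; infer_instance

-- ===== CLAIM (what is proved, stated in full; the proofs are below) =====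
def Claim_equal_combine_subroutes : Prop := ∀ (subroutes : List (List Int)), Dom_combine_subroutes subroutes → Spec_combine_subroutes subroutes (combine_subroutes subroutes)

-- ===== LEMMAS AND PROOFS =====

-- A on a nonempty list equals B's fold (for singletons both sides are the list itself).
theorem combine_eq_foldr : ∀ (s : List (List Int)), s ≠ [] →
    combine_subroutes s = s.dropLast.foldr pvStep [s.getLastD []] := by
  intro s
  induction s with
  | nil => intro h; exact absurd rfl h
  | cons h t ih =>
    intro _
    cases t with
    | nil => simp [combine_subroutes]
    | cons b u =>
      cases u with
      | nil =>
        simp [combine_subroutes, pvStep, List.flatMap]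
      | cons c v =>
        have hrec := ih (by simp)
        rw [combine_subroutes]
        simp only [List.length_cons, List.tail_cons]
        have hlen : ¬ (v.length + 1 + 1 + 1 < 2) := by omega
        have hlen2 : ¬ (v.length + 1 + 1 + 1 = 2) := by omega
        rw [if_neg hlen, if_neg hlen2]
        have hdl : (h :: b :: c :: v).dropLast = h :: (b :: c :: v).dropLast := by
          simp [List.dropLast]
        rw [hdl, List.foldr_cons]
        rw [hrec]
        simp [pvStep, List.getLastD_eq_getLast?, List.getLast?_cons_cons]

-- ===== VERDICT (by name: the statement is the Claim_ definition above) =====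
theorem combine_subroutes_spec : Claim_equal_combine_subroutes := by
  intro s _
  unfold Spec_combine_subroutes combine_subroutes_alt
  by_cases hl : s.length < 2
  · rw [if_pos hl]
    cases s with
    | nil => simp [combine_subroutes]
    | cons h t =>
      cases t with
      | nil => simp [combine_subroutes]
      | cons b u => simp at hl
  · rw [if_neg hl]
    exact combine_eq_foldr s (by intro h; subst h; simp at hl)
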